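-- pv_equiv track=rewrite | github.com/maoulee/RelationRior | src/subgraph_kgqa/inference/backend.py | _infer_wikidata_property
-- ===== SOURCE A (Python) =====
-- from typing import Any, Dict, List, Optional, Tuple
--
-- def _infer_wikidata_property(query: str) -> Optional[Tuple[str, str]]:
--     lowered = str(query or "").lower()
--     if any(token in lowered for token in ("wife", "husband", "spouse", "married")):
--         return ("P26", "spouse")
--     if (
--         "play for" in lowered
--         or "plays for" in lowered
--         or "team" in lowered
--         or "signed with" in lowered
--     ):
--         return ("P54", "member of sports team")
--     return None
-- ===== SOURCE B (Python) =====
-- from typing import Optional, Tuple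
--
-- # triggers tagged with the priority (index) of the rule they fire
-- _TRIGGERS = [
--     ("wife", 0), ("husband", 0), ("spouse", 0), ("married", 0),
--     ("play for", 1), ("plays for", 1), ("team", 1), ("signed with", 1),
-- ]
-- _RESULTS = [("P26", "spouse"), ("P54", "member of sports team")]
--
-- def _infer_wikidata_property(query: str) -> Optional[Tuple[str, str]]:
--     # Single left-to-right sweep over the string: at each position test which
--     # triggers start there, keeping the highest-priority (lowest index) rule
--     # matched anywhere; no per-trigger substring searches.
--     lowered = str(query or "").lower()
--     best = 2
--     for i in range(len(lowered) + 1):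
--         for t, p in _TRIGGERS:
--             if p < best and lowered.startswith(t, i):
--                 best = p
--     return _RESULTS[best] if best < 2 else None
-- ===== Notes on version B (the rewrite author's own statement) =====
-- stated objective: alternative
-- what changed: Replaces the branch chain of independent per-keyword substring-membership tests by a single left-to-right sweep over string positions that checks which priority-tagged triggers start at each position and keeps the minimum priority matched, indexing a result table at the end.
import Mathlib
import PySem

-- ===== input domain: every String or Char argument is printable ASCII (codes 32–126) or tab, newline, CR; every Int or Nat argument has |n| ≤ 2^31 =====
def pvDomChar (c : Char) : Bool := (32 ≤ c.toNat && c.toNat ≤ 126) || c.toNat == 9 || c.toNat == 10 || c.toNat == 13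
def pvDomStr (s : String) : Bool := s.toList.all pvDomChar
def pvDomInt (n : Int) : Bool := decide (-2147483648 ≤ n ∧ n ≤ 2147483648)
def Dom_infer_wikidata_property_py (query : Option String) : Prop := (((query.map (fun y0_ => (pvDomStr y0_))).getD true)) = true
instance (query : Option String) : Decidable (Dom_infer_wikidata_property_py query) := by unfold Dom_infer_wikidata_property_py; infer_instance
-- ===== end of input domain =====

-- B scans the lowered string once, position by position, keeping the minimum priority of any trigger starting there, instead of A's chain of independent substring-membership tests (alternative algorithm).


-- ===== PORT A =====
-- local variable `lowered` is inlined (it names PySem.Str.lower (query.getD ""))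
def infer_wikidata_property_py (query : Option String) : Option (String × String) :=
  if (["wife", "husband", "spouse", "married"].any (fun token => PySem.Str.isIn token (PySem.Str.lower (query.getD "")))) then
    some ("P26", "spouse")
  else if (PySem.Str.isIn "play for" (PySem.Str.lower (query.getD "")) || PySem.Str.isIn "plays for" (PySem.Str.lower (query.getD ""))
      || PySem.Str.isIn "team" (PySem.Str.lower (query.getD "")) || PySem.Str.isIn "signed with" (PySem.Str.lower (query.getD ""))) then
    some ("P54", "member of sports team")
  else
    none

-- ===== PORT B =====
def pvTriggers : List (List Char × Nat) :=
  [("wife".toList, 0), ("husband".toList, 0), ("spouse".toList, 0), ("married".toList, 0),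
   ("play for".toList, 1), ("plays for".toList, 1), ("team".toList, 1), ("signed with".toList, 1)]

def pvResults : List (String × String) := [("P26", "spouse"), ("P54", "member of sports team")]

-- inner loop of Source B: update best with every trigger starting at this position
def pvStep (u : List Char) (best : Nat) : Nat :=
  pvTriggers.foldl (fun b tp => if tp.2 < b && tp.1.isPrefixOf u then tp.2 else b) best

-- outer loop of Source B: i = 0 .. len, i.e. every suffix of the string (incl. the empty one)
def pvScan : List Char → Nat → Nat
  | [], best => pvStep [] best
  | c :: r, best => pvScan r (pvStep (c :: r) best)

def infer_wikidata_property_py_alt (query : Option String) : Option (String × String) :=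
  if pvScan (PySem.Str.lower (query.getD "")).toList 2 < 2 then
    PySem.List.pyGet? pvResults ((pvScan (PySem.Str.lower (query.getD "")).toList 2 : Nat) : Int)
  else none

-- ===== PRECONDITION & SPEC =====
def Spec_infer_wikidata_property_py (query : Option String) (out : Option (String × String)) : Prop := out = infer_wikidata_property_py_alt query
instance (query : Option String) (out : Option (String × String)) : Decidable (Spec_infer_wikidata_property_py query out) := by unfold Spec_infer_wikidata_property_py; infer_instance

-- ===== CLAIM (what is proved, stated in full; the proofs are below) =====
def Claim_equal_infer_wikidata_property_py : Prop := ∀ (query : Option String), Dom_infer_wikidata_property_py query → Spec_infer_wikidata_property_py query (infer_wikidata_property_py query)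

-- ===== LEMMAS AND PROOFS =====

-- proof-only abbreviations: the two trigger groups
def pvT0 : List (List Char) := ["wife".toList, "husband".toList, "spouse".toList, "married".toList]
def pvT1 : List (List Char) := ["play for".toList, "plays for".toList, "team".toList, "signed with".toList]

-- priority of the best trigger STARTING at the head of u
def pvPP (u : List Char) : Nat :=
  if pvT0.any (fun t => t.isPrefixOf u) then 0
  else if pvT1.any (fun t => t.isPrefixOf u) then 1 else 3

-- priority of the best trigger occurring ANYWHERE in s
def pvPrio (s : List Char) : Nat :=
  if pvT0.any (fun t => PySem.Chars.isIn t s) then 0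
  else if pvT1.any (fun t => PySem.Chars.isIn t s) then 1 else 2

-- the inner fold over an arbitrary trigger list
def pvF (u : List Char) (l : List (List Char × Nat)) (b : Nat) : Nat :=
  l.foldl (fun b tp => if tp.2 < b && tp.1.isPrefixOf u then tp.2 else b) b

theorem pvF_cons (u : List Char) (tp : List Char × Nat) (l : List (List Char × Nat)) (c : Nat) :
    pvF u (tp :: l) c = pvF u l (if tp.2 < c ∧ tp.1.isPrefixOf u = true then tp.2 else c) := by
  simp only [pvF, List.foldl_cons]
  congr 1
  by_cases m : tp.1.isPrefixOf u = true <;> by_cases hc : tp.2 < c <;> simp [m, hc]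

theorem pvF_min (u : List Char) (l : List (List Char × Nat)) (hl : ∀ tp ∈ l, tp.2 < 3) :
    ∀ b, b ≤ 3 → pvF u l b = min b (pvF u l 3) := by
  induction l with
  | nil => intro b hb; simp only [pvF, List.foldl_nil]; omega
  | cons tp l ih =>
    intro b hb
    have hp : tp.2 < 3 := hl tp List.mem_cons_self
    have hl' : ∀ x ∈ l, x.2 < 3 := fun x hx => hl x (List.mem_cons_of_mem _ hx)
    rw [pvF_cons, pvF_cons]
    by_cases m : tp.1.isPrefixOf u = true
    · by_cases hlt : tp.2 < b
      · rw [if_pos ⟨hlt, m⟩, if_pos ⟨hp, m⟩, ih hl' tp.2 (by omega)]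
        omega
      · rw [if_neg (fun h => hlt h.1), if_pos ⟨hp, m⟩, ih hl' b hb, ih hl' tp.2 (by omega)]
        omega
    · rw [if_neg (fun h => m h.2), if_neg (fun h => m h.2)]
      exact ih hl' b hb

theorem pvStep3 (u : List Char) : pvStep u 3 = pvPP u := by
  by_cases a1 : ['w','i','f','e'] <+: u
  · simp [pvStep, pvTriggers, pvPP, pvT0, List.isPrefixOf_iff_prefix, a1]
  by_cases a2 : ['h','u','s','b','a','n','d'] <+: u
  · simp [pvStep, pvTriggers, pvPP, pvT0, List.isPrefixOf_iff_prefix, a1, a2]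
  by_cases a3 : ['s','p','o','u','s','e'] <+: u
  · simp [pvStep, pvTriggers, pvPP, pvT0, List.isPrefixOf_iff_prefix, a1, a2, a3]
  by_cases a4 : ['m','a','r','r','i','e','d'] <+: u
  · simp [pvStep, pvTriggers, pvPP, pvT0, List.isPrefixOf_iff_prefix, a1, a2, a3, a4]
  by_cases a5 : ['p','l','a','y',' ','f','o','r'] <+: u
  · simp [pvStep, pvTriggers, pvPP, pvT0, pvT1, List.isPrefixOf_iff_prefix, a1, a2, a3, a4, a5]
  by_cases a6 : ['p','l','a','y','s',' ','f','o','r'] <+: u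
  · simp [pvStep, pvTriggers, pvPP, pvT0, pvT1, List.isPrefixOf_iff_prefix, a1, a2, a3, a4, a5, a6]
  by_cases a7 : ['t','e','a','m'] <+: u
  · simp [pvStep, pvTriggers, pvPP, pvT0, pvT1, List.isPrefixOf_iff_prefix, a1, a2, a3, a4, a5, a6, a7]
  by_cases a8 : ['s','i','g','n','e','d',' ','w','i','t','h'] <+: u
  · simp [pvStep, pvTriggers, pvPP, pvT0, pvT1, List.isPrefixOf_iff_prefix, a1, a2, a3, a4, a5, a6, a7, a8]
  · simp [pvStep, pvTriggers, pvPP, pvT0, pvT1, List.isPrefixOf_iff_prefix, a1, a2, a3, a4, a5, a6, a7, a8]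

theorem pvStep_eq (u : List Char) (best : Nat) (h : best ≤ 2) :
    pvStep u best = min best (pvPP u) := by
  have h1 : pvStep u best = pvF u pvTriggers best := rfl
  have h2 : pvStep u 3 = pvF u pvTriggers 3 := rfl
  rw [h1, pvF_min u pvTriggers (by decide) best (by omega), ← h2, pvStep3]

theorem pvIsIn_cons (t : List Char) (c : Char) (r : List Char) :
    PySem.Chars.isIn t (c :: r) = (t.isPrefixOf (c :: r) || PySem.Chars.isIn t r) := by
  rcases h : PySem.Chars.isIn t (c :: r) with _ | _
  · have hn := (PySem.Chars.isIn_eq_false_iff t (c :: r)).mp h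
    rw [List.infix_cons_iff] at hn
    push_neg at hn
    symm
    simp only [Bool.or_eq_false_iff]
    refine ⟨Bool.eq_false_iff.mpr ?_, (PySem.Chars.isIn_eq_false_iff t r).mpr hn.2⟩
    exact fun hh => hn.1 (List.isPrefixOf_iff_prefix.mp hh)
  · have hi := (PySem.Chars.isIn_iff_infix t (c :: r)).mp h
    rw [List.infix_cons_iff] at hi
    rcases hi with hp | hi
    · simp [List.isPrefixOf_iff_prefix.mpr hp]
    · simp [(PySem.Chars.isIn_iff_infix t r).mpr hi]

theorem pvAny_or {α : Type} (L : List α) (f g : α → Bool) :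
    (L.any fun x => f x || g x) = (L.any f || L.any g) := by
  induction L with
  | nil => simp
  | cons x L ih => simp [List.any_cons, ih, Bool.or_assoc, Bool.or_left_comm]

theorem pvAny_isIn_cons (L : List (List Char)) (c : Char) (r : List Char) :
    (L.any fun t => PySem.Chars.isIn t (c :: r))
      = ((L.any fun t => t.isPrefixOf (c :: r)) || (L.any fun t => PySem.Chars.isIn t r)) := by
  simp only [pvIsIn_cons]
  exact pvAny_or L _ _

theorem pvMin_aux (p0 p1 i0 i1 : Bool) :
    (if (p0 || i0) = true then 0 else if (p1 || i1) = true then 1 else 2)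
      = min (if p0 = true then 0 else if p1 = true then 1 else 3)
            (if i0 = true then 0 else if i1 = true then 1 else 2) := by
  cases p0 <;> cases p1 <;> cases i0 <;> cases i1 <;> decide

theorem pvPrio_cons (c : Char) (r : List Char) :
    pvPrio (c :: r) = min (pvPP (c :: r)) (pvPrio r) := by
  simp only [pvPrio, pvPP]
  rw [pvAny_isIn_cons pvT0, pvAny_isIn_cons pvT1]
  exact pvMin_aux _ _ _ _

theorem pvScan_eq (s : List Char) : ∀ best, best ≤ 2 → pvScan s best = min best (pvPrio s) := by
  induction s with
  | nil =>
    intro best h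
    rw [pvScan, pvStep_eq _ _ h]
    have h1 : pvPP ([] : List Char) = 3 := by decide
    have h2 : pvPrio ([] : List Char) = 2 := by decide
    rw [h1, h2]
    omega
  | cons c r ih =>
    intro best h
    rw [pvScan, pvStep_eq _ _ h, ih _ (le_trans (Nat.min_le_left _ _) h), pvPrio_cons]
    omega

theorem pvScan_two (s : List Char) : pvScan s 2 = pvPrio s := by
  rw [pvScan_eq s 2 (le_refl 2)]
  simp only [pvPrio]
  split_ifs <;> omega

-- ===== VERDICT (by name: the statement is the Claim_ definition above) =====
theorem infer_wikidata_property_py_spec : Claim_equal_infer_wikidata_property_py := by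
  intro query _
  unfold Spec_infer_wikidata_property_py infer_wikidata_property_py infer_wikidata_property_py_alt
  rw [pvScan_two]
  have hA : (["wife", "husband", "spouse", "married"].any
        (fun token => PySem.Str.isIn token (PySem.Str.lower (query.getD ""))))
      = pvT0.any (fun t => PySem.Chars.isIn t (PySem.Str.lower (query.getD "")).toList) := by
    simp [pvT0, List.any_cons, List.any_nil]
  have hB : (PySem.Str.isIn "play for" (PySem.Str.lower (query.getD ""))
        || PySem.Str.isIn "plays for" (PySem.Str.lower (query.getD ""))
        || PySem.Str.isIn "team" (PySem.Str.lower (query.getD ""))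
        || PySem.Str.isIn "signed with" (PySem.Str.lower (query.getD "")))
      = pvT1.any (fun t => PySem.Chars.isIn t (PySem.Str.lower (query.getD "")).toList) := by
    simp [pvT1, List.any_cons, List.any_nil, Bool.or_assoc]
  rw [hA, hB]
  by_cases h0 : pvT0.any (fun t => PySem.Chars.isIn t (PySem.Str.lower (query.getD "")).toList) = true
  · rw [if_pos h0]
    simp only [pvPrio, h0, if_true]
    decide
  · rw [if_neg h0]
    by_cases h1 : pvT1.any (fun t => PySem.Chars.isIn t (PySem.Str.lower (query.getD "")).toList) = true
    · rw [if_pos h1]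
      simp only [pvPrio, h0, h1, if_true, if_false, Bool.false_eq_true]
      decide
    · rw [if_neg h1]
      simp only [pvPrio, h0, h1, if_false, Bool.false_eq_true]
      simp
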